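/- GENERATED by farm/mkstatement.py from design/units.tsv (unit `start_decoder.F7`) and the assertions of Vorbis/Spec/StartDecoderB.lean — do not edit.
   THE STATEMENT of the proof unit `start_decoder.F7`: segment F7 of `start_decoder` (33 instructions; entries 0x115842;
   exits 0x11526a; ranges 0x115842-0x1158f3)
   takes each of its entry assertions to one of its exit assertions (`Vorbis.Spec.StartDecoder.SegF7`), given the contracts of its callees.
   What the names mean: Vorbis/Spec/Basic.lean (the shared hypotheses), Vorbis/Spec/StartDecoderB.lean (the assertions). The theorem to prove:
   `theorem start_decoder_F7_ok : Vorbis.Spec.start_decoder_F7.Statement`. -/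
import Vorbis.Spec.PacketRest
import Vorbis.Spec.StartDecoderB
namespace Vorbis.Spec.start_decoder_F7
open X86 X86.User Asan

/-- The statement of unit `start_decoder.F7`. -/
def Statement : Prop :=
  ∀ (Lay : Layout) (_hLay : Lay.hi = 0x1000000) (μ : Microarch) (_hμ : UserX.MicroOK μ) (u₀ : State)
    (_hcode : HasCodeNat Lay u₀ Vorbis.L.start_decoder.entry Vorbis.Code.code_start_decoder.nat Vorbis.L.start_decoder.size)
    (_h_neighbors : ∀ (others : List Obj) (frames : List (Nat × FrameLayout)), Calls Lay μ Vorbis.WayInv (Vorbis.conv u₀) Vorbis.L.neighbors.entry (Vorbis.Spec.neighbors.spec others frames))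
    (_h_asan_store1_noabort : Asan.SmallCheck Lay μ Vorbis.WayInv (Vorbis.CodeOK u₀) [.rax, .rdx] 1 Vorbis.L.__asan_store1_noabort.entry),
    Vorbis.Spec.StartDecoder.SegF7 Lay μ u₀

end Vorbis.Spec.start_decoder_F7
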